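-- pv_equiv track=rewrite | github.com/xsuik33/Teor-a-de-la-Computaci-n-4CM2 | Practica1TeoCom.py | kleene_star
-- ===== SOURCE A (Python) =====
-- def kleene_star(alphabet: list[str], max_len: int) -> list[str]:
--     result = ["ε"]
--     queue = [""]
--     while queue:
--         curr = queue.pop(0)
--         for c in alphabet:
--             nxt = curr + c
--             if len(nxt) <= max_len:
--                 result.append(nxt)
--                 queue.append(nxt)
--     return result
-- ===== SOURCE B (Python) =====
-- import itertools
--
-- def kleene_star(alphabet: list[str], max_len: int) -> list[str]:
--     result = ["ε"]
--     n = 1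
--     while True:
--         level = []
--         for tup in itertools.product(alphabet, repeat=n):
--             s = "".join(tup)
--             if len(s) <= max_len:
--                 level.append(s)
--         if not level:
--             return result
--         result += level
--         n += 1
-- ===== Notes on version B (the rewrite author's own statement) =====
-- stated objective: alternative
-- what changed: No BFS traversal at all: the queue, pop(0) and any stored frontier/previous level are gone; each symbol-count n is enumerated independently from scratch as the n-fold Cartesian power itertools.product(alphabet, repeat=n), joining and length-filtering each tuple, stopping at the first n that contributes no string.
import Mathlib
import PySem

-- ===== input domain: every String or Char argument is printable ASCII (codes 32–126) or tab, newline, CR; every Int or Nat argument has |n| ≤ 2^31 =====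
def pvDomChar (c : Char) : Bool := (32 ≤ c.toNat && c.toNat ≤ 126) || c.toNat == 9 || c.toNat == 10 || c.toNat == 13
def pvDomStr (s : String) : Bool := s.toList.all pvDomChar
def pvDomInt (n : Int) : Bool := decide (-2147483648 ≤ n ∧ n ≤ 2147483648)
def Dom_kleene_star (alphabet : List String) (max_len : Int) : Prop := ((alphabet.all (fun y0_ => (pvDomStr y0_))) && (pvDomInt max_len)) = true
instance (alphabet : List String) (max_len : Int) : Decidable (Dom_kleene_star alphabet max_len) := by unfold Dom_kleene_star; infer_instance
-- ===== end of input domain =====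

-- B removes A's BFS traversal entirely (queue, pop(0), frontier): each symbol-count n is
-- enumerated from scratch as the n-fold Cartesian power of the alphabet, joined and
-- length-filtered, stopping at the first n contributing nothing (alternative).
-- Both ports are fuelled: the fuel is only a totality guard (the Python while-loops
-- diverge when "" ∈ alphabet and 0 ≤ max_len, which Pre_ excludes).

-- ===== PORT A =====
-- children of one string: the strings A appends when expanding `curr` (used only to size A's fuel)
def pvChildren (alphabet : List String) (max_len : Int) (s : String) : List String :=
  (alphabet.map (fun c => s ++ c)).filter (fun t => decide (PySem.Str.len t ≤ max_len))

def pvNext (alphabet : List String) (max_len : Int) (L : List String) : List String :=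
  L.flatMap (pvChildren alphabet max_len)

-- total number of queue pops A performs in k generations (fuel bound for the while-loop)
def pvTotal (alphabet : List String) (max_len : Int) : Nat → List String → Nat
  | 0, _ => 0
  | k + 1, L => L.length + pvTotal alphabet max_len k (pvNext alphabet max_len L)

-- the while-loop of A: pop the queue head, expand it over the alphabet (explicit for-loop = foldl)
def pvLoopA (alphabet : List String) (max_len : Int) : Nat → List String → List String → List String
  | 0, result, _ => result
  | f + 1, result, queue =>
    match queue with
    | [] => result
    | curr :: rest =>
      let st := alphabet.foldl
        (fun (st : List String × List String) c =>
          let nxt := curr ++ c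
          if PySem.Str.len nxt ≤ max_len then (st.1 ++ [nxt], st.2 ++ [nxt]) else st)
        (result, rest)
      pvLoopA alphabet max_len f st.1 st.2

def kleene_star (alphabet : List String) (max_len : Int) : List String :=
  pvLoopA alphabet max_len
    (pvTotal alphabet max_len (max_len.toNat + 2) [""]) ["ε"] [""]

-- ===== PORT B =====
-- itertools.product(alphabet, repeat=n): all n-tuples, rightmost coordinate varying fastest
def pvProd (alphabet : List String) : Nat → List (List String)
  | 0 => [[]]
  | n + 1 => (pvProd alphabet n).flatMap (fun t => alphabet.map (fun a => t ++ [a]))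

-- the body of B's while-iteration for a given n: join each tuple, keep it if it fits
def pvLevel (alphabet : List String) (max_len : Int) (n : Nat) : List String :=
  ((pvProd alphabet n).map (fun t => String.join t)).filter
    (fun s => decide (PySem.Str.len s ≤ max_len))

-- the while True loop of B: compute level n, stop if empty, else append and go to n+1
def pvLoopB (alphabet : List String) (max_len : Int) : Nat → Nat → List String → List String
  | 0, _, result => result
  | f + 1, n, result =>
    let lv := pvLevel alphabet max_len n
    if lv = [] then result else pvLoopB alphabet max_len f (n + 1) (result ++ lv)

def kleene_star_alt (alphabet : List String) (max_len : Int) : List String :=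
  pvLoopB alphabet max_len (max_len.toNat + 2) 1 ["ε"]

-- ===== PRECONDITION & SPEC =====
-- Pre_ excludes exactly the inputs on which A's while-loop never terminates:
-- "" ∈ alphabet with 0 ≤ max_len re-enqueues curr+"" = curr forever.
def Pre_kleene_star (alphabet : List String) (max_len : Int) : Prop :=
  "" ∈ alphabet → max_len < 0
instance (alphabet : List String) (max_len : Int) : Decidable (Pre_kleene_star alphabet max_len) := by
  unfold Pre_kleene_star; infer_instance

def pvWitness_kleene_star : List String × Int := (["a", "b"], 2)

def Spec_kleene_star (alphabet : List String) (max_len : Int) (out : List String) : Prop := out = kleene_star_alt alphabet max_len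
instance (alphabet : List String) (max_len : Int) (out : List String) : Decidable (Spec_kleene_star alphabet max_len out) := by unfold Spec_kleene_star; infer_instance

-- ===== CLAIM (what is proved, stated in full; the proofs are below) =====
def Claim_equal_kleene_star : Prop := ∀ (alphabet : List String) (max_len : Int), Dom_kleene_star alphabet max_len → Pre_kleene_star alphabet max_len → Spec_kleene_star alphabet max_len (kleene_star alphabet max_len)

-- ===== LEMMAS AND PROOFS =====

-- k-fold iteration of pvNext (the k-th generation)
def pvIter (alphabet : List String) (max_len : Int) : Nat → List String → List String
  | 0, L => L
  | k + 1, L => pvIter alphabet max_len k (pvNext alphabet max_len L)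

-- the concatenation of the first k generations after L (both loops produce this)
def pvOut (alphabet : List String) (max_len : Int) : Nat → List String → List String
  | 0, _ => []
  | k + 1, L => pvNext alphabet max_len L ++ pvOut alphabet max_len k (pvNext alphabet max_len L)

theorem pvNext_nil (alphabet : List String) (max_len : Int) :
    pvNext alphabet max_len [] = [] := rfl

theorem pvOut_nil (alphabet : List String) (max_len : Int) (k : Nat) :
    pvOut alphabet max_len k [] = [] := by
  induction k with
  | zero => rfl
  | succ k ih => simp [pvOut, pvNext_nil, ih]

theorem pvIter_nil (alphabet : List String) (max_len : Int) (k : Nat) :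
    pvIter alphabet max_len k [] = [] := by
  induction k with
  | zero => rfl
  | succ k ih => simp [pvIter, pvNext_nil, ih]

-- A's inner for-loop over the alphabet appends the children to both result and queue
theorem pvFoldA_eq (max_len : Int) (curr : String) :
    ∀ (al : List String) (res rest : List String),
      al.foldl
        (fun (st : List String × List String) c =>
          let nxt := curr ++ c
          if PySem.Str.len nxt ≤ max_len then (st.1 ++ [nxt], st.2 ++ [nxt]) else st)
        (res, rest)
      = (res ++ pvChildren al max_len curr, rest ++ pvChildren al max_len curr) := by
  intro al
  induction al with
  | nil => intro res rest; simp [pvChildren]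
  | cons c al ih =>
    intro res rest
    simp only [List.foldl_cons]
    by_cases h : PySem.Str.len (curr ++ c) ≤ max_len
    · simp only [if_pos h, ih, pvChildren, List.map_cons, List.filter_cons, decide_eq_true h]
      simp
    · simp only [if_neg h, ih, pvChildren, List.map_cons, List.filter_cons, decide_eq_false h]
      simp

-- processing a whole prefix P of the queue costs |P| fuel and appends P's children
theorem pvLoopA_prefix (alphabet : List String) (max_len : Int) :
    ∀ (P : List String) (f : Nat) (N res : List String),
      pvLoopA alphabet max_len (f + P.length) res (P ++ N)
        = pvLoopA alphabet max_len f (res ++ pvNext alphabet max_len P)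
            (N ++ pvNext alphabet max_len P) := by
  intro P
  induction P with
  | nil => intro f N res; simp [pvNext]
  | cons p P ih =>
    intro f N res
    have hfuel : f + (p :: P).length = (f + P.length) + 1 := by simp [List.length_cons]; omega
    rw [hfuel]
    show pvLoopA alphabet max_len ((f + P.length) + 1) res (p :: (P ++ N)) = _
    simp only [pvLoopA]
    rw [pvFoldA_eq]
    dsimp only
    rw [List.append_assoc P N (pvChildren alphabet max_len p)]
    rw [ih f (N ++ pvChildren alphabet max_len p) (res ++ pvChildren alphabet max_len p)]
    have hflat : pvNext alphabet max_len (p :: P)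
        = pvChildren alphabet max_len p ++ pvNext alphabet max_len P := by
      simp [pvNext]
    rw [hflat]
    simp [List.append_assoc]

-- with fuel = total pops of k generations and the (k+1)-st generation empty,
-- A's loop appends exactly the generations
theorem pvLoopA_eq (alphabet : List String) (max_len : Int) :
    ∀ (k : Nat) (P res : List String), pvIter alphabet max_len k P = [] →
      pvLoopA alphabet max_len (pvTotal alphabet max_len k P) res P
        = res ++ pvOut alphabet max_len k P := by
  intro k
  induction k with
  | zero =>
    intro P res h
    simp only [pvIter] at h; subst h
    simp [pvTotal, pvLoopA, pvOut]
  | succ k ih =>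
    intro P res h
    have hT : pvTotal alphabet max_len (k + 1) P
        = pvTotal alphabet max_len k (pvNext alphabet max_len P) + P.length := by
      simp [pvTotal]; omega
    rw [hT]
    have := pvLoopA_prefix alphabet max_len P
      (pvTotal alphabet max_len k (pvNext alphabet max_len P)) [] res
    simp only [List.append_nil, List.nil_append] at this
    rw [this]
    rw [ih (pvNext alphabet max_len P) (res ++ pvNext alphabet max_len P) h]
    simp [pvOut, List.append_assoc]

-- length facts about generations (used to show the (max_len.toNat+2)-nd generation is empty)
theorem pvMem_next (alphabet : List String) (max_len : Int) (L : List String) (t : String)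
    (ht : t ∈ pvNext alphabet max_len L) :
    (∃ s ∈ L, ∃ c ∈ alphabet, t = s ++ c) ∧ PySem.Str.len t ≤ max_len := by
  simp only [pvNext, List.mem_flatMap, pvChildren, List.mem_filter, List.mem_map] at ht
  obtain ⟨s, hs, ⟨⟨c, hc, rfl⟩, hlen⟩⟩ := ht
  exact ⟨⟨s, hs, c, hc, rfl⟩, by simpa using hlen⟩

theorem pvLen_grow (alphabet : List String) (max_len : Int)
    (halph : "" ∉ alphabet) :
    ∀ (k : Nat) (L : List String) (b : Int),
      (∀ s ∈ L, b ≤ PySem.Str.len s) →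
      ∀ t ∈ pvIter alphabet max_len k L, b + k ≤ PySem.Str.len t := by
  intro k
  induction k with
  | zero => intro L b hb t ht; simpa using hb t ht
  | succ k ih =>
    intro L b hb t ht
    simp only [pvIter] at ht
    have hnext : ∀ s ∈ pvNext alphabet max_len L, b + 1 ≤ PySem.Str.len s := by
      intro s hs
      obtain ⟨⟨u, hu, c, hc, rfl⟩, _⟩ := pvMem_next alphabet max_len L s hs
      have hc1 : (1 : Int) ≤ PySem.Str.len c := by
        have hcne : c ≠ "" := fun h => halph (h ▸ hc)
        have hne : c.toList ≠ [] := by simpa using hcne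
        have hpos : 0 < c.toList.length := List.length_pos_iff.mpr hne
        simp only [PySem.Str.len_eq]
        omega
      have := hb u hu
      rw [PySem.Str.len_append]
      omega
    have := ih (pvNext alphabet max_len L) (b + 1) hnext t ht
    omega

theorem pvIter_comm (alphabet : List String) (max_len : Int) :
    ∀ (k : Nat) (L : List String),
      pvIter alphabet max_len k (pvNext alphabet max_len L)
        = pvNext alphabet max_len (pvIter alphabet max_len k L) := by
  intro k
  induction k with
  | zero => intro L; rfl
  | succ k ih => intro L; simp only [pvIter, ih]

theorem pvIter_empty (alphabet : List String) (max_len : Int)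
    (hpre : "" ∈ alphabet → max_len < 0) :
    pvIter alphabet max_len (max_len.toNat + 2) [""] = [] := by
  by_cases hneg : max_len < 0
  · have h1 : pvNext alphabet max_len [""] = [] := by
      apply List.eq_nil_iff_forall_not_mem.mpr
      intro t ht
      have := (pvMem_next alphabet max_len [""] t ht).2
      have h0 : (0 : Int) ≤ PySem.Str.len t := by simp [PySem.Str.len_eq]
      omega
    show pvIter alphabet max_len (max_len.toNat + 1) (pvNext alphabet max_len [""]) = []
    rw [h1, pvIter_nil]
  · have halph : "" ∉ alphabet := fun h => hneg (hpre h)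
    apply List.eq_nil_iff_forall_not_mem.mpr
    intro t ht
    have hgrow := pvLen_grow alphabet max_len halph (max_len.toNat + 2) [""] 0
      (by intro s hs; simp at hs; subst hs; simp [PySem.Str.len_eq]) t ht
    have ht' : t ∈ pvNext alphabet max_len (pvIter alphabet max_len (max_len.toNat + 1) [""]) := by
      have : pvIter alphabet max_len (max_len.toNat + 2) [""]
          = pvNext alphabet max_len (pvIter alphabet max_len (max_len.toNat + 1) [""]) := by
        show pvIter alphabet max_len (max_len.toNat + 1) (pvNext alphabet max_len [""]) = _
        rw [pvIter_comm]
      rw [this] at ht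
      exact ht
    have hle := (pvMem_next alphabet max_len _ t ht').2
    have : max_len ≤ (max_len.toNat : Int) := Int.self_le_toNat max_len
    omega

-- ===== B-side lemmas: pvLevel (n+1) is exactly the (n+1)-st generation =====

theorem pvJoin_snoc (l : List String) (a : String) :
    String.join (l ++ [a]) = String.join l ++ a := by
  simp [String.join, List.foldl_append]

-- dropping the strings that already fail the length filter loses no children
theorem pvDropFail (alphabet : List String) (max_len : Int) :
    ∀ (xs : List String),
      (xs.filter (fun s => decide (PySem.Str.len s ≤ max_len))).flatMap
          (pvChildren alphabet max_len)
        = xs.flatMap (pvChildren alphabet max_len) := by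
  intro xs
  induction xs with
  | nil => rfl
  | cons s xs ih =>
    rw [List.filter_cons]
    by_cases h : PySem.Str.len s ≤ max_len
    · rw [if_pos (by exact decide_eq_true h), List.flatMap_cons, List.flatMap_cons, ih]
    · have hchild : pvChildren alphabet max_len s = [] := by
        apply List.eq_nil_iff_forall_not_mem.mpr
        intro t ht
        simp only [pvChildren, List.mem_filter, List.mem_map] at ht
        obtain ⟨⟨c, _, rfl⟩, hlen⟩ := ht
        rw [decide_eq_true_iff, PySem.Str.len_append] at hlen
        have hc0 : (0 : Int) ≤ PySem.Str.len c := by simp [PySem.Str.len_eq]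
        omega
      rw [if_neg (by simp only [decide_eq_true_iff]; exact h), ih, List.flatMap_cons, hchild, List.nil_append]

theorem pvLevel_succ (alphabet : List String) (max_len : Int) (n : Nat) :
    pvLevel alphabet max_len (n + 1)
      = pvNext alphabet max_len (pvLevel alphabet max_len n) := by
  have hunf : (pvProd alphabet (n + 1)).map (fun t => String.join t)
      = ((pvProd alphabet n).map (fun t => String.join t)).flatMap
          (fun s => alphabet.map (fun c => s ++ c)) := by
    simp only [pvProd, List.map_flatMap, List.flatMap_map, List.map_map]
    congr 1
    funext t
    simp [Function.comp, pvJoin_snoc]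
  unfold pvLevel pvNext
  rw [hunf, pvDropFail alphabet max_len, List.filter_flatMap]
  rfl

theorem pvLevel_one (alphabet : List String) (max_len : Int) :
    pvLevel alphabet max_len 1 = pvNext alphabet max_len [""] := by
  unfold pvLevel pvNext pvChildren
  simp only [pvProd, List.flatMap_cons, List.flatMap_nil, List.append_nil, List.map_map]
  rfl

theorem pvLevel_gen (alphabet : List String) (max_len : Int) :
    ∀ (n : Nat), pvLevel alphabet max_len (n + 1) = pvIter alphabet max_len (n + 1) [""] := by
  intro n
  induction n with
  | zero =>
    rw [pvLevel_one]
    rfl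
  | succ n ih =>
    rw [pvLevel_succ, ih]
    show _ = pvIter alphabet max_len (n + 2) [""]
    have : pvIter alphabet max_len (n + 2) [""]
        = pvNext alphabet max_len (pvIter alphabet max_len (n + 1) [""]) := by
      have h2 : pvIter alphabet max_len (n + 2) [""]
          = pvIter alphabet max_len (n + 1) (pvNext alphabet max_len [""]) := rfl
      rw [h2, pvIter_comm]
    rw [this]

-- B's loop, started at level n+1, appends exactly the generations after pvIter n [""]
theorem pvLoopB_eq (alphabet : List String) (max_len : Int) :
    ∀ (f n : Nat) (res : List String),
      pvLoopB alphabet max_len f (n + 1) res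
        = res ++ pvOut alphabet max_len f (pvIter alphabet max_len n [""]) := by
  intro f
  induction f with
  | zero => intro n res; simp [pvLoopB, pvOut]
  | succ f ih =>
    intro n res
    have hlv : pvLevel alphabet max_len (n + 1)
        = pvNext alphabet max_len (pvIter alphabet max_len n [""]) := by
      rw [pvLevel_gen]
      show pvIter alphabet max_len (n + 1) [""] = _
      have h2 : pvIter alphabet max_len (n + 1) [""]
          = pvIter alphabet max_len n (pvNext alphabet max_len [""]) := rfl
      rw [h2, pvIter_comm]
    simp only [pvLoopB, hlv]
    by_cases h : pvNext alphabet max_len (pvIter alphabet max_len n [""]) = []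
    · rw [if_pos h]
      simp [pvOut, h, pvOut_nil]
    · rw [if_neg h]
      rw [ih (n + 1)]
      have hiter : pvIter alphabet max_len (n + 1) [""]
          = pvNext alphabet max_len (pvIter alphabet max_len n [""]) := by
        have h2 : pvIter alphabet max_len (n + 1) [""]
            = pvIter alphabet max_len n (pvNext alphabet max_len [""]) := rfl
        rw [h2, pvIter_comm]
      rw [hiter]
      simp [pvOut, List.append_assoc]

-- ===== VERDICT (by name: the statement is the Claim_ definition above) =====
theorem kleene_star_spec : Claim_equal_kleene_star := by
  intro alphabet max_len _ hpre
  unfold Spec_kleene_star kleene_star kleene_star_alt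
  rw [pvLoopA_eq alphabet max_len (max_len.toNat + 2) [""] ["ε"]
    (pvIter_empty alphabet max_len hpre)]
  rw [pvLoopB_eq alphabet max_len (max_len.toNat + 2) 0 ["ε"]]
  rfl
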